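-- pv_equiv track=rewrite | github.com/donolsthoorn-dev/ktm-converter | modules/ymm_export.py | build_sku_to_candidate_handles
-- ===== SOURCE A (Python) =====
-- from collections import defaultdict
--
-- def build_sku_to_candidate_handles(product_rows: list[dict]) -> dict[str, list[str]]:
--     """
--     Each variant SKU can appear under multiple STRUKTUR_ELEMENT keys in the XML, each
--     with a different computed handle. Shopify Product Id is keyed by one of those
--     handles in product_ids_from_xml.csv — not always the same one resolve_handle_for_sku picks.
--     """
--     m: dict[str, list[str]] = defaultdict(list)
--     for p in product_rows:
--         sku = (p.get("sku") or "").strip()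
--         h = (p.get("handle") or "").strip()
--         if not sku or not h:
--             continue
--         if h not in m[sku]:
--             m[sku].append(h)
--     return dict(m)
-- ===== SOURCE B (Python) =====
-- def build_sku_to_candidate_handles(product_rows: list[dict]) -> dict[str, list[str]]:
--     # Pass 1: flatten rows to cleaned (sku, handle) pairs; no dict maintained.
--     pairs = []
--     for p in product_rows:
--         sku = (p.get("sku") or "").strip()
--         h = (p.get("handle") or "").strip()
--         if sku and h:
--             pairs.append((sku, h))
--     # Pass 2: distinct skus in first-occurrence order; for each, dedup its handles.
--     skus = dict.fromkeys(s for s, _ in pairs)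
--     return {s: list(dict.fromkeys(h for t, h in pairs if t == s)) for s in skus}
-- ===== Notes on version B (the rewrite author's own statement) =====
-- stated objective: alternative
-- what changed: B never builds an incremental dict: it flattens the rows into cleaned (sku, handle) pairs, takes the distinct skus in first-occurrence order, and for each sku filters the pair list and dedups its handles with dict.fromkeys, instead of A's single pass maintaining a defaultdict with an inline 'h not in m[sku]' check.
import Mathlib
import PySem

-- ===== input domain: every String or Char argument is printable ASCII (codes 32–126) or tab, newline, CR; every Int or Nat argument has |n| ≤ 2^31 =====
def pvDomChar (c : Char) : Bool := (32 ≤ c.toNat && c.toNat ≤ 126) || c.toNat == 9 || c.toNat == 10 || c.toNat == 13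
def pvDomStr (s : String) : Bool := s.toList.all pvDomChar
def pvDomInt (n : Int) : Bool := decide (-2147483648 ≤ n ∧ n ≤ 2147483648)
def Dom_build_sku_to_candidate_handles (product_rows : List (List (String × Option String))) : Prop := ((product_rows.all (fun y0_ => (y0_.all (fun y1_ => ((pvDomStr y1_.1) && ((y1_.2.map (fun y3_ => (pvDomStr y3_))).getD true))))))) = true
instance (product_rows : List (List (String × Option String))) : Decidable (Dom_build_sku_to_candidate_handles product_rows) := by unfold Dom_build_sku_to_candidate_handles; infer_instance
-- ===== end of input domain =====

-- B replaces A's incremental dict-with-inline-membership-check by a flatten-to-pairs pass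
-- followed by a per-distinct-sku filter-and-dedup pass (no dict built at all); objective: alternative decomposition.

-- (p.get(k) or "").strip() on a row dict, first-match lookup (the same expression in both Pythons)
def pvField (p : List (String × Option String)) (k : String) : String :=
  PySem.Str.strip ((((p.find? (fun kv => kv.1 == k)).map (fun kv => kv.2)).getD none).getD "")

-- ===== PORT A =====
-- loop body: skip if sku or handle strips empty, else append h to m[sku] unless already present
def pvStepA (d : PySem.Dict String (List String)) (p : List (String × Option String)) :
    PySem.Dict String (List String) :=
  let sku := pvField p "sku"
  let h := pvField p "handle"
  if sku = "" ∨ h = "" then d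
  else d.modify sku [] (fun cur => if h ∈ cur then cur else cur ++ [h])

def build_sku_to_candidate_handles (product_rows : List (List (String × Option String))) : List (String × List String) :=
  (product_rows.foldl pvStepA PySem.Dict.empty).items

-- ===== PORT B =====
-- pass 1: flatten the rows into cleaned (sku, handle) pairs
def pvPairs (product_rows : List (List (String × Option String))) : List (String × String) :=
  product_rows.filterMap (fun p =>
    let sku := pvField p "sku"
    let h := pvField p "handle"
    if sku = "" ∨ h = "" then none else some (sku, h))

-- pass 2: distinct skus in first-occurrence order, then per sku filter its handles and dedup them
def build_sku_to_candidate_handles_alt (product_rows : List (List (String × Option String))) : List (String × List String) :=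
  let pairs := pvPairs product_rows
  (PySem.List.dedup (pairs.map Prod.fst)).map
    (fun s => (s, PySem.List.dedup ((pairs.filter (fun q => q.1 == s)).map Prod.snd)))

-- ===== PRECONDITION & SPEC =====
def Spec_build_sku_to_candidate_handles (product_rows : List (List (String × Option String))) (out : List (String × List String)) : Prop := out = build_sku_to_candidate_handles_alt product_rows
instance (product_rows : List (List (String × Option String))) (out : List (String × List String)) : Decidable (Spec_build_sku_to_candidate_handles product_rows out) := by unfold Spec_build_sku_to_candidate_handles; infer_instance

-- ===== CLAIM (what is proved, stated in full; the proofs are below) =====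
def Claim_equal_build_sku_to_candidate_handles : Prop := ∀ (product_rows : List (List (String × Option String))), Dom_build_sku_to_candidate_handles product_rows → Spec_build_sku_to_candidate_handles product_rows (build_sku_to_candidate_handles product_rows)

-- ===== LEMMAS AND PROOFS =====

-- A's fold over the rows is a fold of the dedup-snoc step over the flattened pairs
theorem pv_foldA_eq_foldl_pairs (rows : List (List (String × Option String)))
    (d : PySem.Dict String (List String)) :
    rows.foldl pvStepA d =
      (pvPairs rows).foldl
        (fun d q => d.modify q.1 [] (fun cur => if q.2 ∈ cur then cur else cur ++ [q.2])) d := by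
  induction rows generalizing d with
  | nil => rfl
  | cons r rs ih =>
    simp only [List.foldl_cons, pvPairs, List.filterMap_cons, pvStepA]
    split_ifs with hc <;> simp [ih, pvPairs]

-- value at a key after A's fold: fold the dedup-snoc over that key's handles
theorem pv_getD_foldA (pairs : List (String × String)) (d : PySem.Dict String (List String))
    (s : String) :
    (pairs.foldl
        (fun d q => d.modify q.1 [] (fun cur => if q.2 ∈ cur then cur else cur ++ [q.2])) d).getD s []
      = ((pairs.filter (fun q => q.1 == s)).map Prod.snd).foldl
          (fun cur h => if h ∈ cur then cur else cur ++ [h]) (d.getD s []) := by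
  induction pairs generalizing d with
  | nil => rfl
  | cons q qs ih =>
    simp only [List.foldl_cons, List.filter_cons]
    by_cases hq : q.1 = s
    · simp [hq, ih]
    · have : (q.1 == s) = false := by simp [hq]
      simp [this, ih, PySem.Dict.getD_modify, Ne.symm hq]

-- PySem.List.dedup xs IS that fold from []
theorem pv_dedup_eq_foldl (xs : List String) :
    PySem.List.dedup xs = xs.foldl (fun cur h => if h ∈ cur then cur else cur ++ [h]) [] := by
  have hadd : (PySem.Set.add : List String → String → List String)
      = fun cur h => if h ∈ cur then cur else cur ++ [h] := by
    funext cur h; simp [PySem.Set.add]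
  simp only [PySem.List.dedup_eq_ofList, PySem.Set.ofList_eq_foldl, hadd]

-- ===== VERDICT (by name: the statement is the Claim_ definition above) =====
theorem build_sku_to_candidate_handles_spec : Claim_equal_build_sku_to_candidate_handles := by
  intro rows _
  unfold Spec_build_sku_to_candidate_handles build_sku_to_candidate_handles
    build_sku_to_candidate_handles_alt
  rw [pv_foldA_eq_foldl_pairs]
  set pairs := pvPairs rows with hp
  set D := pairs.foldl
      (fun d q => d.modify q.1 [] (fun cur => if q.2 ∈ cur then cur else cur ++ [q.2]))
      PySem.Dict.empty with hD
  have hnd : D.keys.Nodup := by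
    rw [hD]
    exact PySem.Dict.nodup_keys_foldl_modify_key pairs Prod.fst []
      (fun _ q cur => if q.2 ∈ cur then cur else cur ++ [q.2]) PySem.Dict.empty
      (by simp)
  have hkeys : D.keys = PySem.List.dedup (pairs.map Prod.fst) := by
    rw [hD, PySem.Dict.keys_foldl_modify_key pairs Prod.fst []
      (fun _ q cur => if q.2 ∈ cur then cur else cur ++ [q.2]) PySem.Dict.empty]
    simp [PySem.Set.update, PySem.List.dedup_eq_ofList, PySem.Set.ofList_eq_foldl,
      PySem.Dict.keys_empty]
  rw [PySem.Dict.items_eq_map_keys D hnd [], hkeys]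
  refine List.map_congr_left (fun s _ => ?_)
  rw [hD, pv_getD_foldA, pv_dedup_eq_foldl]
  simp [PySem.Dict.getD_empty]
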